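-- pv_equiv track=rewrite | github.com/km796/Python-Algorithm-Exercise | get_max_barrier.py | getMaxBarrier
-- ===== SOURCE A (Python) =====
-- def binarySearch(array, x, low, high):
--
--     # Repeat until the pointers low and high meet each other
--     while low <= high:
--
--         mid = low + (high - low)//2
--
--         if array[mid] == x:
--             return mid
--
--         elif array[mid] < x:
--             low = mid + 1
--
--         else:
--             high = mid - 1
--
--     return low-1
--
-- def getMaxBarrier(initialEnergy, th):
--     initialEnergy.sort()
--     l = len(initialEnergy)
--     SU = sum(initialEnergy)
--     b = max(initialEnergy)
--     while True:
--         k = binarySearch(initialEnergy, b, 0, len(initialEnergy)-1)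
--         if k == -1:
--             s = sum(initialEnergy) - b*len(initialEnergy)
--         else:
--             s = sum(initialEnergy[k+1:])  - b*len(initialEnergy[k+1:])
--
--         if s>=th:
--             return b
--         else:
--             b -= 1
--         if b < 0:
--             return 0
--
--     return b-1
-- ===== SOURCE B (Python) =====
-- def getMaxBarrier(initialEnergy, th):
--     # Same in-place sort side effect as the original; return value proved equal.
--     initialEnergy.sort()
--     m = initialEnergy[-1]
--
--     def surplus(b):
--         return sum(x - b for x in initialEnergy if x > b)
--
--     if surplus(m) >= th:
--         return m
--     if m <= 0:
--         return 0
--     # surplus is non-increasing in b: binary search the largest b in [0, m-1]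
--     # with surplus(b) >= th; if even surplus(0) < th, return 0.
--     lo, hi = 0, m - 1
--     while lo < hi:
--         mid = (lo + hi + 1) // 2
--         if surplus(mid) >= th:
--             lo = mid
--         else:
--             hi = mid - 1
--     return lo if surplus(lo) >= th else 0
-- ===== Notes on version B (the rewrite author's own statement) =====
-- stated objective: alternative
-- what changed: A scans barrier values one by one downward from max(arr) (an O(n) tail-sum per value); B binary-searches the barrier directly, using that the tail surplus is monotone in the barrier (worst-case asymptotically better, but not measurably faster on the random timing family, where A stops after a few barrier values).
-- outside the precondition, e.g. on getMaxBarrier([], 0): A raises ValueError, B raises IndexError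
import Mathlib
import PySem

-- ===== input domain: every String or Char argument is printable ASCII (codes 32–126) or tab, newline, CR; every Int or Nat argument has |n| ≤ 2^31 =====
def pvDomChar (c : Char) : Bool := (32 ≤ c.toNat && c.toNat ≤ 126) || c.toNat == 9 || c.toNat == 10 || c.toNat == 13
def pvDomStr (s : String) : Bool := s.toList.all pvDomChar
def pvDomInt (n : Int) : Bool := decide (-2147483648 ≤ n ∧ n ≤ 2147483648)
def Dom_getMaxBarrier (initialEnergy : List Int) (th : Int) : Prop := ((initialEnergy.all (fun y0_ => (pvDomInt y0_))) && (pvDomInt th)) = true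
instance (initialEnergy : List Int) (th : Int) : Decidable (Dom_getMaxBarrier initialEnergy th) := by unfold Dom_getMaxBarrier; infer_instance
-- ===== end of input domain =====

-- B replaces A's linear downward scan over barrier values by a binary search on the
-- barrier (the tail surplus is monotone in the barrier); equality is about the return
-- value — both A and B sort the argument list in place.

-- ===== PORT A =====
-- helper binarySearch: the while-loop becomes recursion on the shrinking interval
def binarySearch (array : List Int) (x : Int) (low : Int) (high : Int) : Int :=
  if _h : low ≤ high then
    let mid := low + PySem.Int.floordiv (high - low) 2
    let v := PySem.List.pyGetD array mid 0   -- array[mid]; mid is in range at every call A makes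
    if v == x then mid
    else if v < x then binarySearch array x (mid + 1) high
    else binarySearch array x low (mid - 1)
  else low - 1
termination_by (high - low + 1).toNat
decreasing_by
  all_goals
    (rw [PySem.Int.floordiv_eq_ediv_of_pos (by norm_num : (0:Int) < 2)] at *; omega)

-- the `while True` loop of A, recursing on the decreasing barrier b
def gmbLoop (ie : List Int) (th : Int) (b : Int) : Int :=
  let k := binarySearch ie b 0 ((ie.length : Int) - 1)
  let s := if k == -1 then ie.sum - b * (ie.length : Int)
           else (PySem.List.slice ie (some (k + 1)) none).sum
                  - b * ((PySem.List.slice ie (some (k + 1)) none).length : Int)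
  if s ≥ th then b
  else if _h : b - 1 < 0 then 0
  else gmbLoop ie th (b - 1)
termination_by b.toNat
decreasing_by omega

def getMaxBarrier (initialEnergy : List Int) (th : Int) : Int :=
  let ie := PySem.List.sorted initialEnergy (fun x => x) false
  -- Python also binds l = len(ie) and SU = sum(ie); both are never used
  let b := (PySem.List.max? ie (fun x => x)).getD 0   -- max(ie); raises on [] (outside Pre_)
  gmbLoop ie th b

-- ===== PORT B =====
-- sum(x - b for x in ie if x > b)
def altSurplus (ie : List Int) (b : Int) : Int :=
  ((ie.filter (fun x => decide (b < x))).map (fun x => x - b)).sum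

-- binary search for the largest b in [lo, hi] with surplus(b) >= th (caller checks the result)
def altSearch (ie : List Int) (th : Int) (lo : Int) (hi : Int) : Int :=
  if _h : lo < hi then
    let mid := PySem.Int.floordiv (lo + hi + 1) 2
    if altSurplus ie mid ≥ th then altSearch ie th mid hi
    else altSearch ie th lo (mid - 1)
  else lo
termination_by (hi - lo).toNat
decreasing_by
  all_goals
    (rw [PySem.Int.floordiv_eq_ediv_of_pos (by norm_num : (0:Int) < 2)] at *; omega)

def getMaxBarrier_alt (initialEnergy : List Int) (th : Int) : Int :=
  let ie := PySem.List.sorted initialEnergy (fun x => x) false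
  let m := (PySem.List.pyGet? ie (-1)).getD 0   -- ie[-1]; raises on [] (outside Pre_)
  if altSurplus ie m ≥ th then m
  else if m ≤ 0 then 0
  else
    let lo := altSearch ie th 0 (m - 1)
    if altSurplus ie lo ≥ th then lo else 0

-- ===== PRECONDITION & SPEC =====
-- Pre_ excludes only the empty list, on which A's max(initialEnergy) raises ValueError (B's ie[-1] raises too)
def Pre_getMaxBarrier (initialEnergy : List Int) (th : Int) : Prop := initialEnergy ≠ []
instance (initialEnergy : List Int) (th : Int) : Decidable (Pre_getMaxBarrier initialEnergy th) := by unfold Pre_getMaxBarrier; infer_instance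

def pvWitness_getMaxBarrier : List Int × Int := ([3, 1, 2], 2)

def Spec_getMaxBarrier (initialEnergy : List Int) (th : Int) (out : Int) : Prop := out = getMaxBarrier_alt initialEnergy th
instance (initialEnergy : List Int) (th : Int) (out : Int) : Decidable (Spec_getMaxBarrier initialEnergy th out) := by unfold Spec_getMaxBarrier; infer_instance

-- ===== CLAIM (what is proved, stated in full; the proofs are below) =====
def Claim_equal_getMaxBarrier : Prop := ∀ (initialEnergy : List Int) (th : Int), Dom_getMaxBarrier initialEnergy th → Pre_getMaxBarrier initialEnergy th → Spec_getMaxBarrier initialEnergy th (getMaxBarrier initialEnergy th)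

-- ===== LEMMAS AND PROOFS =====

-- Σ_{x ∈ ie} max(x - b, 0): the common value of A's tail sum and B's surplus
def Smax (ie : List Int) (b : Int) : Int := (ie.map (fun x => max (x - b) 0)).sum

theorem altSurplus_eq (ie : List Int) (b : Int) : altSurplus ie b = Smax ie b := by
  unfold altSurplus Smax
  induction ie with
  | nil => rfl
  | cons x t ih =>
    by_cases h : b < x
    · simp only [List.filter_cons, List.map_cons, List.sum_cons, h, decide_true, if_true]
      rw [ih, show max (x - b) 0 = x - b by omega]
    · simp only [List.filter_cons, List.map_cons, List.sum_cons, h, decide_false,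
        Bool.false_eq_true, if_false]
      rw [ih, show max (x - b) 0 = 0 by omega]; omega

theorem Smax_mono (ie : List Int) {b b' : Int} (h : b ≤ b') : Smax ie b' ≤ Smax ie b := by
  induction ie with
  | nil => simp [Smax]
  | cons x t ih =>
    simp only [Smax, List.map_cons, List.sum_cons] at *
    have : max (x - b') 0 ≤ max (x - b) 0 := by omega
    omega


theorem sum_map_sub (l : List Int) (b : Int) :
    (l.map (fun x => x - b)).sum = l.sum - b * (l.length : Int) := by
  induction l with
  | nil => simp
  | cons x t ih =>
    simp only [List.map_cons, List.sum_cons, List.length_cons, ih]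
    push_cast; ring


theorem drop_sum_eq (ie : List Int) (b : Int) (t : Nat)
    (h1 : ∀ (i : Nat) (h : i < ie.length), i < t → ie[i] ≤ b)
    (h2 : ∀ (i : Nat) (h : i < ie.length), t ≤ i → b ≤ ie[i]) :
    ((ie.drop t).map (fun x => x - b)).sum = Smax ie b := by
  have hsplit : Smax ie b
      = ((ie.take t).map (fun x => max (x - b) 0)).sum
        + ((ie.drop t).map (fun x => max (x - b) 0)).sum := by
    unfold Smax
    conv_lhs => rw [← List.take_append_drop t ie]
    rw [List.map_append, List.sum_append]
  have hA : ((ie.take t).map (fun x => max (x - b) 0)).sum = 0 := by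
    apply List.sum_eq_zero
    intro y hy
    obtain ⟨z, hz, rfl⟩ := List.mem_map.mp hy
    obtain ⟨i, hi, rfl⟩ := List.mem_iff_getElem.mp hz
    rw [List.getElem_take]
    have hlen : i < ie.length := by
      have := (ie.length_take (i := t))
      omega
    have := h1 i hlen (by have := (ie.length_take (i := t)); omega)
    omega
  have hB : ((ie.drop t).map (fun x => max (x - b) 0)).sum
      = ((ie.drop t).map (fun x => x - b)).sum := by
    have hcg : ∀ y ∈ ie.drop t, max (y - b) 0 = y - b := by
      intro y hy
      obtain ⟨i, hi, rfl⟩ := List.mem_iff_getElem.mp hy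
      rw [List.getElem_drop]
      have hlen : t + i < ie.length := by
        have := (ie.length_drop (i := t))
        omega
      have := h2 (t + i) hlen (by omega)
      omega
    rw [List.map_congr_left hcg]
  rw [hsplit, hA, hB]; omega

theorem bs_spec (ie : List Int) (x : Int) (hp : ie.Pairwise (· ≤ ·)) :
    ∀ (N : Nat) (low high : Int), (high - low + 1).toNat ≤ N →
    0 ≤ low → high < (ie.length : Int) → low ≤ high + 1 →
    (∀ (i : Nat) (h : i < ie.length), (i : Int) < low → ie[i] ≤ x) →
    (∀ (i : Nat) (h : i < ie.length), high < (i : Int) → x ≤ ie[i]) →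
    -1 ≤ binarySearch ie x low high ∧ binarySearch ie x low high < (ie.length : Int) ∧
    (∀ (i : Nat) (h : i < ie.length), (i : Int) ≤ binarySearch ie x low high → ie[i] ≤ x) ∧
    (∀ (i : Nat) (h : i < ie.length), binarySearch ie x low high < (i : Int) → x ≤ ie[i]) := by
  have hpg := List.pairwise_iff_getElem.mp hp
  intro N
  induction N with
  | zero =>
    intro low high hfuel h0 hhi hle hL hR
    have hlh : ¬ low ≤ high := by omega
    rw [binarySearch]
    simp only [dif_neg hlh]
    refine ⟨by omega, by omega, ?_, ?_⟩
    · intro i h hi; exact hL i h (by omega)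
    · intro i h hi; exact hR i h (by omega)
  | succ N ih =>
    intro low high hfuel h0 hhi hle hL hR
    by_cases hlh : low ≤ high
    · rw [binarySearch]
      simp only [dif_pos hlh]
      set mid := low + PySem.Int.floordiv (high - low) 2 with hmid
      have hmid2 : low ≤ mid ∧ mid ≤ high := by
        rw [hmid, PySem.Int.floordiv_eq_ediv_of_pos (by norm_num : (0:Int) < 2)]
        omega
      have h0m : 0 ≤ mid := by omega
      have hmn : mid < (ie.length : Int) := by omega
      rw [PySem.List.pyGetD_eq_getElem ie 0 h0m hmn]
      have hjlt : mid.toNat < ie.length := by omega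
      have hji : (mid.toNat : Int) = mid := by omega
      by_cases hvx : ie[mid.toNat] = x
      · simp only [hvx, BEq.rfl, if_true]
        refine ⟨by omega, by omega, ?_, ?_⟩
        · intro i h hi
          have hij : i ≤ mid.toNat := by omega
          rcases lt_or_eq_of_le hij with hlt | heq
          · have := hpg i mid.toNat h hjlt hlt; omega
          · subst heq; omega
        · intro i h hi
          have hij : mid.toNat < i := by omega
          have := hpg mid.toNat i hjlt h hij; omega
      · have hbeq : (ie[mid.toNat] == x) = false := by simp [hvx]
        simp only [hbeq, Bool.false_eq_true, if_false]
        by_cases hlt : ie[mid.toNat] < x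
        · simp only [hlt, if_true]
          apply ih (mid + 1) high (by omega) (by omega) hhi (by omega) ?_ hR
          intro i h hi
          have hij : i ≤ mid.toNat := by omega
          rcases lt_or_eq_of_le hij with hlt2 | heq
          · have := hpg i mid.toNat h hjlt hlt2; omega
          · subst heq; omega
        · simp only [hlt, if_false]
          have hgt : x < ie[mid.toNat] := by omega
          apply ih low (mid - 1) (by omega) h0 (by omega) (by omega) hL ?_
          intro i h hi
          have hij : mid.toNat ≤ i := by omega
          rcases lt_or_eq_of_le hij with hlt2 | heq
          · have := hpg mid.toNat i hjlt h hlt2; omega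
          · subst heq; omega
    · rw [binarySearch]
      simp only [dif_neg hlh]
      refine ⟨by omega, by omega, ?_, ?_⟩
      · intro i h hi; exact hL i h (by omega)
      · intro i h hi; exact hR i h (by omega)

theorem gmbLoop_eq (ie : List Int) (hp : ie.Pairwise (· ≤ ·)) (th b : Int) :
    gmbLoop ie th b =
      if Smax ie b ≥ th then b else if b - 1 < 0 then 0 else gmbLoop ie th (b - 1) := by
  obtain ⟨hk1, hk2, hkL, hkR⟩ :=
    bs_spec ie b hp ((((ie.length : Int) - 1) - 0 + 1).toNat) 0 ((ie.length : Int) - 1)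
      le_rfl (by omega) (by omega) (by omega)
      (by intro i h hi; omega) (by intro i h hi; omega)
  set k := binarySearch ie b 0 ((ie.length : Int) - 1) with hkdef
  have hs : (if k == -1 then ie.sum - b * (ie.length : Int)
             else (PySem.List.slice ie (some (k + 1)) none).sum
                    - b * ((PySem.List.slice ie (some (k + 1)) none).length : Int))
      = Smax ie b := by
    by_cases hkm : k = -1
    · simp only [hkm, BEq.rfl, if_true]
      have h2 : ∀ (i : Nat) (h : i < ie.length), 0 ≤ i → b ≤ ie[i] := by
        intro i h _; exact hkR i h (by omega)
      have hds := drop_sum_eq ie b 0 (by intro i h hi; omega) h2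
      simp only [List.drop_zero] at hds
      rw [← hds, sum_map_sub]
    · have hk0 : 0 ≤ k := by omega
      have hbeq : (k == -1) = false := by simp [hkm]
      simp only [hbeq, Bool.false_eq_true, if_false]
      rw [PySem.List.slice_from ie (by omega : (0:Int) ≤ k + 1), ← sum_map_sub]
      apply drop_sum_eq
      · intro i h hi; exact hkL i h (by omega)
      · intro i h hi; exact hkR i h (by omega)
  rw [gmbLoop]
  simp only [dite_eq_ite, ← hkdef]
  rw [hs]

-- r is A's/B's common answer for barriers searched in [0, b]
def GoodB (ie : List Int) (th b r : Int) : Prop :=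
  (0 ≤ r ∧ r ≤ b ∧ th ≤ Smax ie r ∧ ∀ c, r < c → c ≤ b → Smax ie c < th) ∨
  (r = 0 ∧ ∀ c, 0 ≤ c → c ≤ b → Smax ie c < th)

theorem good_unique (ie : List Int) (th b r1 r2 : Int)
    (h1 : GoodB ie th b r1) (h2 : GoodB ie th b r2) : r1 = r2 := by
  rcases h1 with ⟨ha1, ha2, ha3, ha4⟩ | ⟨ha1, ha2⟩ <;>
    rcases h2 with ⟨hb1, hb2, hb3, hb4⟩ | ⟨hb1, hb2⟩
  · rcases lt_trichotomy r1 r2 with hlt | heq | hgt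
    · have := ha4 r2 hlt hb2; omega
    · exact heq
    · have := hb4 r1 hgt ha2; omega
  · have := hb2 r1 ha1 ha2; omega
  · have := ha2 r2 hb1 hb2; omega
  · omega

theorem gmb_good (ie : List Int) (hp : ie.Pairwise (· ≤ ·)) (th : Int) :
    ∀ (N : Nat) (b : Int), b.toNat ≤ N → 0 ≤ b → GoodB ie th b (gmbLoop ie th b) := by
  intro N
  induction N with
  | zero =>
    intro b hfuel hb
    have hb0 : b = 0 := by omega
    subst hb0
    rw [gmbLoop_eq ie hp]
    by_cases hth : Smax ie 0 ≥ th
    · simp only [hth, if_true]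
      exact Or.inl ⟨le_rfl, le_rfl, hth, by intro c hc1 hc2; omega⟩
    · simp only [hth, if_false]
      norm_num
      refine Or.inr ⟨rfl, ?_⟩
      intro c hc1 hc2
      have : c = 0 := by omega
      subst this; omega
  | succ N ih =>
    intro b hfuel hb
    rw [gmbLoop_eq ie hp]
    by_cases hth : Smax ie b ≥ th
    · simp only [hth, if_true]
      exact Or.inl ⟨hb, le_rfl, hth, by intro c hc1 hc2; omega⟩
    · simp only [hth, if_false]
      by_cases hb1 : b - 1 < 0
      · simp only [hb1, if_true]
        have hb0 : b = 0 := by omega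
        refine Or.inr ⟨rfl, ?_⟩
        intro c hc1 hc2
        have : c = 0 := by omega
        subst this; rw [← hb0]; omega
      · simp only [hb1, if_false]
        have hgood := ih (b - 1) (by omega) (by omega)
        rcases hgood with ⟨g1, g2, g3, g4⟩ | ⟨g1, g2⟩
        · refine Or.inl ⟨g1, by omega, g3, ?_⟩
          intro c hc1 hc2
          rcases le_or_gt c (b - 1) with hcb | hcb
          · exact g4 c hc1 hcb
          · have : c = b := by omega
            subst this; omega
        · refine Or.inr ⟨g1, ?_⟩
          intro c hc1 hc2
          rcases le_or_gt c (b - 1) with hcb | hcb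
          · exact g2 c hc1 hcb
          · have : c = b := by omega
            subst this; omega

theorem altSearch_spec (ie : List Int) (th H : Int) :
    ∀ (N : Nat) (lo hi : Int), (hi - lo).toNat ≤ N →
    0 ≤ lo → lo ≤ hi → hi ≤ H →
    (th ≤ Smax ie lo ∨ lo = 0) →
    (∀ c, hi < c → c ≤ H → Smax ie c < th) →
    0 ≤ altSearch ie th lo hi ∧ altSearch ie th lo hi ≤ H ∧
    (th ≤ Smax ie (altSearch ie th lo hi) ∨ altSearch ie th lo hi = 0) ∧
    (∀ c, altSearch ie th lo hi < c → c ≤ H → Smax ie c < th) := by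
  intro N
  induction N with
  | zero =>
    intro lo hi hfuel h0 hle hhi hA hB
    have hlh : ¬ lo < hi := by omega
    rw [altSearch]
    simp only [dif_neg hlh]
    refine ⟨h0, by omega, hA, ?_⟩
    intro c hc1 hc2
    exact hB c (by omega) hc2
  | succ N ih =>
    intro lo hi hfuel h0 hle hhi hA hB
    by_cases hlh : lo < hi
    · rw [altSearch]
      simp only [dif_pos hlh]
      set mid := PySem.Int.floordiv (lo + hi + 1) 2 with hmid
      have hmid2 : lo < mid ∧ mid ≤ hi := by
        rw [hmid, PySem.Int.floordiv_eq_ediv_of_pos (by norm_num : (0:Int) < 2)]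
        omega
      by_cases hsm : altSurplus ie mid ≥ th
      · simp only [hsm, if_true]
        rw [altSurplus_eq] at hsm
        exact ih mid hi (by omega) (by omega) (by omega) hhi (Or.inl hsm) hB
      · simp only [hsm, if_false]
        rw [altSurplus_eq] at hsm
        apply ih lo (mid - 1) (by omega) h0 (by omega) (by omega) hA
        intro c hc1 hc2
        rcases le_or_gt c hi with hch | hch
        · have hmono := Smax_mono ie (show mid ≤ c by omega)
          omega
        · exact hB c hch hc2
    · rw [altSearch]
      simp only [dif_neg hlh]
      refine ⟨h0, by omega, hA, ?_⟩
      intro c hc1 hc2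
      exact hB c (by omega) hc2

-- ===== VERDICT (by name: the statement is the Claim_ definition above) =====
theorem getLast_is_max (ie : List Int) (hp : ie.Pairwise (· ≤ ·)) (hne : ie ≠ [])
    {v : Int} (hv : v ∈ ie) : v ≤ ie.getLast hne := by
  have hpg := List.pairwise_iff_getElem.mp hp
  obtain ⟨i, hi, rfl⟩ := List.mem_iff_getElem.mp hv
  rw [List.getLast_eq_getElem]
  rcases lt_or_eq_of_le (show i ≤ ie.length - 1 by omega) with hlt | heq
  · exact hpg i (ie.length - 1) hi (by omega) hlt
  · subst heq; exact le_rfl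

theorem getMaxBarrier_spec : Claim_equal_getMaxBarrier := by
  intro initialEnergy th _hDom hPre
  unfold Spec_getMaxBarrier
  simp only [getMaxBarrier, getMaxBarrier_alt]
  set ie := PySem.List.sorted initialEnergy (fun x => x) false with hie
  have hp : ie.Pairwise (· ≤ ·) := PySem.List.sorted_pairwise initialEnergy (fun x => x)
  have hlen : ie.length = initialEnergy.length :=
    PySem.List.length_sorted initialEnergy (fun x => x) false
  have hne : ie ≠ [] := by
    intro h
    apply hPre
    have : initialEnergy.length = 0 := by rw [← hlen, h]; rfl
    exact List.length_eq_zero_iff.mp this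
  set m := ie.getLast hne with hm
  have hBm : (PySem.List.pyGet? ie (-1)).getD 0 = m := by
    rw [PySem.List.pyGet?_neg_one, List.getLast?_eq_some_getLast hne]
    rfl
  have hmax : (PySem.List.max? ie (fun x => x)).getD 0 = m := by
    obtain ⟨v, hv⟩ : ∃ v, PySem.List.max? ie (fun x => x) = some v := by
      cases hx : PySem.List.max? ie (fun x => x) with
      | none => exact absurd ((PySem.List.max?_eq_none_iff ie _).mp hx) hne
      | some v => exact ⟨v, rfl⟩
    rw [hv]
    have h1 : m ≤ v := PySem.List.max?_isMax hv m (List.getLast_mem hne)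
    have h2 : v ≤ m := getLast_is_max ie hp hne (PySem.List.max?_mem hv)
    have : v = m := le_antisymm h2 h1
    rw [this]; rfl
  rw [hmax, hBm]
  simp only [altSurplus_eq]
  by_cases h1 : Smax ie m ≥ th
  · rw [gmbLoop_eq ie hp]
    simp only [h1, if_true]
  · by_cases h2 : m ≤ 0
    · rw [gmbLoop_eq ie hp]
      simp only [h1, h2, if_false, if_true, show m - 1 < 0 by omega]
    · have hA : gmbLoop ie th m = gmbLoop ie th (m - 1) := by
        rw [gmbLoop_eq ie hp]
        simp only [h1, if_false, show ¬(m - 1 < 0) by omega]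
      have hAg : GoodB ie th (m - 1) (gmbLoop ie th (m - 1)) :=
        gmb_good ie hp th (m - 1).toNat (m - 1) le_rfl (by omega)
      obtain ⟨s1, s2, s3, s4⟩ :=
        altSearch_spec ie th (m - 1) (m - 1 - 0).toNat 0 (m - 1) le_rfl le_rfl (by omega)
          le_rfl (Or.inr rfl) (by intro c hc1 hc2; omega)
      set r := altSearch ie th 0 (m - 1) with hr
      have hBg : GoodB ie th (m - 1) (if Smax ie r ≥ th then r else 0) := by
        by_cases hrth : Smax ie r ≥ th
        · simp only [hrth, if_true]
          exact Or.inl ⟨s1, s2, hrth, s4⟩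
        · simp only [hrth, if_false]
          refine Or.inr ⟨rfl, ?_⟩
          intro c hc1 hc2
          rcases s3 with hs | hs
          · omega
          · rcases lt_or_eq_of_le hc1 with hc0 | hc0
            · exact s4 c (by omega) hc2
            · rw [← hc0]
              rw [hs] at hrth
              omega
      rw [hA, good_unique ie th (m - 1) _ _ hAg hBg]
      simp only [h1, h2, if_false]
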